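-- pv_equiv track=rewrite | github.com/SRHgroup/design_TCR_HDRTs | build_TCR_HDRTs.py | select_codon
-- ===== SOURCE A (Python) =====
-- human_codon_usage = {
--     "F": {"TTT": 0.46, "TTC": 0.54},
--     "S": {"TCT": 0.19, "TCC": 0.22, "TCA": 0.15, "TCG": 0.05, "AGT": 0.15, "AGC": 0.24},
--     "Y": {"TAT": 0.44, "TAC": 0.56},
--     "C": {"TGT": 0.46, "TGC": 0.54},
--     "L": {"TTA": 0.08, "TTG": 0.13, "CTT": 0.13, "CTC": 0.20, "CTA": 0.07, "CTG": 0.40},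
--     "*": {"TAA": 0.30, "TGA": 0.47, "TAG": 0.24},
--     "W": {"TGG": 1.00},
--     "P": {"CCT": 0.29, "CCC": 0.32, "CCA": 0.28, "CCG": 0.11},
--     "H": {"CAT": 0.42, "CAC": 0.58},
--     "Q": {"CAA": 0.27, "CAG": 0.73},
--     "R": {"CGT": 0.08, "CGC": 0.18, "CGA": 0.11, "CGG": 0.20, "AGA": 0.21, "AGG": 0.21},
--     "I": {"ATT": 0.36, "ATC": 0.47, "ATA": 0.17},
--     "T": {"ACT": 0.25, "ACC": 0.36, "ACA": 0.28, "ACG": 0.11},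
--     "N": {"AAT": 0.47, "AAC": 0.53},
--     "K": {"AAA": 0.43, "AAG": 0.57},
--     "M": {"ATG": 1.00},
--     "V": {"GTT": 0.18, "GTC": 0.24, "GTA": 0.12, "GTG": 0.46},
--     "A": {"GCT": 0.27, "GCC": 0.40, "GCA": 0.23, "GCG": 0.11},
--     "D": {"GAT": 0.46, "GAC": 0.54},
--     "E": {"GAA": 0.42, "GAG": 0.58},
--     "G": {"GGT": 0.16, "GGC": 0.34, "GGA": 0.25, "GGG": 0.25}
-- }
--
-- def select_codon(aa, current_codon):
--     # Get codons sorted by usage frequency (highest first)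
--     sorted_codons = sorted(
--         human_codon_usage[aa].items(),
--         key=lambda x: x[1],
--         reverse=True
--     )
--     for codon, _ in sorted_codons:
--         if codon != current_codon.upper():
--             return codon
--     # fallback: return current codon if no alternative (rare)
--     return current_codon.upper()
-- ===== SOURCE B (Python) =====
-- # Precomputed answer table: for each amino acid only the top-two codons of the
-- # (fixed, constant) human_codon_usage table can ever be returned, so we store
-- # exactly those (stable descending order; None when the amino acid has a single codon).
-- top_two = {
--     "F": ("TTC", "TTT"),
--     "S": ("AGC", "TCC"),
--     "Y": ("TAC", "TAT"),
--     "C": ("TGC", "TGT"),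
--     "L": ("CTG", "CTC"),
--     "*": ("TGA", "TAA"),
--     "W": ("TGG", None),
--     "P": ("CCC", "CCT"),
--     "H": ("CAC", "CAT"),
--     "Q": ("CAG", "CAA"),
--     "R": ("AGA", "AGG"),
--     "I": ("ATC", "ATT"),
--     "T": ("ACC", "ACA"),
--     "N": ("AAC", "AAT"),
--     "K": ("AAG", "AAA"),
--     "M": ("ATG", None),
--     "V": ("GTG", "GTC"),
--     "A": ("GCC", "GCT"),
--     "D": ("GAC", "GAT"),
--     "E": ("GAG", "GAA"),
--     "G": ("GGC", "GGA"),
-- }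
--
-- def select_codon(aa, current_codon):
--     best, second = top_two[aa]
--     cur = current_codon.upper()
--     if cur != best:
--         return best
--     return second if second is not None else cur
-- ===== Notes on version B (the rewrite author's own statement) =====
-- stated objective: faster
-- what changed: Replaces the runtime sort-then-scan over the usage dictionary by an O(1) lookup in a precomputed top-two table: only the highest- and second-highest-usage codons (stable descending order) can ever be answered, so B stores exactly those per amino acid and branches on whether the current codon equals the best one.
import Mathlib
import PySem

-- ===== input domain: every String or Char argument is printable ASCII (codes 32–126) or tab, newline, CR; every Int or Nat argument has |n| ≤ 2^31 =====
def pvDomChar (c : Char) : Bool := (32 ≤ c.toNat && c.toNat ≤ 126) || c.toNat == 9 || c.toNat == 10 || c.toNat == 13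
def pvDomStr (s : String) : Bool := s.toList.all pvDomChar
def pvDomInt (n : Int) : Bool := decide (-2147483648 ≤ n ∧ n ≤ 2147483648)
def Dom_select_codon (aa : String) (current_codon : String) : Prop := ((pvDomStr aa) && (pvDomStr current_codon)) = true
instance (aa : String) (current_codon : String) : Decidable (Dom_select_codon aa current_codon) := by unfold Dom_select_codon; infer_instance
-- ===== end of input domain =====

set_option maxHeartbeats 1600000


-- B replaces A's runtime sort-then-scan by an O(1) lookup in a precomputed top-two table
-- (only the two highest-usage codons of the fixed constant table can ever be returned).
-- Usage frequencies are ported as exact integer percentages (0.46 → 46), preserving all comparisons.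

-- ===== PORT A =====
-- A's constant table human_codon_usage (usages ×100)
def human_codon_usage : List (String × List (String × Int)) :=
  [("F", [("TTT", 46), ("TTC", 54)]),
   ("S", [("TCT", 19), ("TCC", 22), ("TCA", 15), ("TCG", 5), ("AGT", 15), ("AGC", 24)]),
   ("Y", [("TAT", 44), ("TAC", 56)]),
   ("C", [("TGT", 46), ("TGC", 54)]),
   ("L", [("TTA", 8), ("TTG", 13), ("CTT", 13), ("CTC", 20), ("CTA", 7), ("CTG", 40)]),
   ("*", [("TAA", 30), ("TGA", 47), ("TAG", 24)]),
   ("W", [("TGG", 100)]),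
   ("P", [("CCT", 29), ("CCC", 32), ("CCA", 28), ("CCG", 11)]),
   ("H", [("CAT", 42), ("CAC", 58)]),
   ("Q", [("CAA", 27), ("CAG", 73)]),
   ("R", [("CGT", 8), ("CGC", 18), ("CGA", 11), ("CGG", 20), ("AGA", 21), ("AGG", 21)]),
   ("I", [("ATT", 36), ("ATC", 47), ("ATA", 17)]),
   ("T", [("ACT", 25), ("ACC", 36), ("ACA", 28), ("ACG", 11)]),
   ("N", [("AAT", 47), ("AAC", 53)]),
   ("K", [("AAA", 43), ("AAG", 57)]),
   ("M", [("ATG", 100)]),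
   ("V", [("GTT", 18), ("GTC", 24), ("GTA", 12), ("GTG", 46)]),
   ("A", [("GCT", 27), ("GCC", 40), ("GCA", 23), ("GCG", 11)]),
   ("D", [("GAT", 46), ("GAC", 54)]),
   ("E", [("GAA", 42), ("GAG", 58)]),
   ("G", [("GGT", 16), ("GGC", 34), ("GGA", 25), ("GGG", 25)])]

-- the 'for codon, _ in sorted_codons: if codon != current_codon.upper(): return codon' loop
def firstDiffA (cu : String) : List (String × Int) → String
  | [] => cu                                   -- fallback: return current codon
  | (c, _) :: t => if c ≠ cu then c else firstDiffA cu t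

def select_codon (aa : String) (current_codon : String) : String :=
  let sorted_codons := PySem.List.sorted ((human_codon_usage.lookup aa).getD []) (fun x => x.2) true
  firstDiffA (PySem.Str.upper current_codon) sorted_codons

-- ===== PORT B =====
-- B's precomputed table: (best codon, second-best codon or none) per amino acid
def top_two : List (String × (String × Option String)) :=
  [("F", ("TTC", some "TTT")),
   ("S", ("AGC", some "TCC")),
   ("Y", ("TAC", some "TAT")),
   ("C", ("TGC", some "TGT")),
   ("L", ("CTG", some "CTC")),
   ("*", ("TGA", some "TAA")),
   ("W", ("TGG", none)),
   ("P", ("CCC", some "CCT")),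
   ("H", ("CAC", some "CAT")),
   ("Q", ("CAG", some "CAA")),
   ("R", ("AGA", some "AGG")),
   ("I", ("ATC", some "ATT")),
   ("T", ("ACC", some "ACA")),
   ("N", ("AAC", some "AAT")),
   ("K", ("AAG", some "AAA")),
   ("M", ("ATG", none)),
   ("V", ("GTG", some "GTC")),
   ("A", ("GCC", some "GCT")),
   ("D", ("GAC", some "GAT")),
   ("E", ("GAG", some "GAA")),
   ("G", ("GGC", some "GGA"))]

def select_codon_alt (aa : String) (current_codon : String) : String :=
  let p := (top_two.lookup aa).getD ("", none)
  let cur := PySem.Str.upper current_codon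
  if cur ≠ p.1 then p.1
  else match p.2 with
       | some s => s
       | none => cur

-- ===== PRECONDITION & SPEC =====
-- A raises KeyError when aa is not a key of human_codon_usage; Pre_ admits exactly the table's keys.
def Pre_select_codon (aa : String) (current_codon : String) : Prop :=
  aa ∈ ["F", "S", "Y", "C", "L", "*", "W", "P", "H", "Q", "R", "I", "T", "N", "K", "M", "V", "A", "D", "E", "G"]
instance (aa : String) (current_codon : String) : Decidable (Pre_select_codon aa current_codon) := by
  unfold Pre_select_codon; infer_instance

def pvWitness_select_codon : String × String := ("S", "agc")

def Spec_select_codon (aa : String) (current_codon : String) (out : String) : Prop := out = select_codon_alt aa current_codon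
instance (aa : String) (current_codon : String) (out : String) : Decidable (Spec_select_codon aa current_codon out) := by unfold Spec_select_codon; infer_instance

-- ===== CLAIM (what is proved, stated in full; the proofs are below) =====
def Claim_equal_select_codon : Prop := ∀ (aa : String) (current_codon : String), Dom_select_codon aa current_codon → Pre_select_codon aa current_codon → Spec_select_codon aa current_codon (select_codon aa current_codon)

-- ===== LEMMAS AND PROOFS =====

lemma case_F (cc : String) : select_codon "F" cc = select_codon_alt "F" cc := by
  unfold select_codon select_codon_alt
  have hs : PySem.List.sorted ((human_codon_usage.lookup "F").getD []) (fun x => x.2) true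
      = [("TTC", 54), ("TTT", 46)] := rfl
  have ht : (top_two.lookup "F").getD ("", none) = ("TTC", some "TTT") := rfl
  rw [hs, ht]
  generalize PySem.Str.upper cc = cu
  by_cases h0 : cu = "TTC"
  · subst h0; decide
  by_cases h1 : cu = "TTT"
  · subst h1; decide
  simp_all [firstDiffA, eq_comm]

lemma case_S (cc : String) : select_codon "S" cc = select_codon_alt "S" cc := by
  unfold select_codon select_codon_alt
  have hs : PySem.List.sorted ((human_codon_usage.lookup "S").getD []) (fun x => x.2) true
      = [("AGC", 24), ("TCC", 22), ("TCT", 19), ("TCA", 15), ("AGT", 15), ("TCG", 5)] := rfl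
  have ht : (top_two.lookup "S").getD ("", none) = ("AGC", some "TCC") := rfl
  rw [hs, ht]
  generalize PySem.Str.upper cc = cu
  by_cases h0 : cu = "AGC"
  · subst h0; decide
  by_cases h1 : cu = "TCC"
  · subst h1; decide
  by_cases h2 : cu = "TCT"
  · subst h2; decide
  by_cases h3 : cu = "TCA"
  · subst h3; decide
  by_cases h4 : cu = "AGT"
  · subst h4; decide
  by_cases h5 : cu = "TCG"
  · subst h5; decide
  simp_all [firstDiffA, eq_comm]

lemma case_Y (cc : String) : select_codon "Y" cc = select_codon_alt "Y" cc := by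
  unfold select_codon select_codon_alt
  have hs : PySem.List.sorted ((human_codon_usage.lookup "Y").getD []) (fun x => x.2) true
      = [("TAC", 56), ("TAT", 44)] := rfl
  have ht : (top_two.lookup "Y").getD ("", none) = ("TAC", some "TAT") := rfl
  rw [hs, ht]
  generalize PySem.Str.upper cc = cu
  by_cases h0 : cu = "TAC"
  · subst h0; decide
  by_cases h1 : cu = "TAT"
  · subst h1; decide
  simp_all [firstDiffA, eq_comm]

lemma case_C (cc : String) : select_codon "C" cc = select_codon_alt "C" cc := by
  unfold select_codon select_codon_alt
  have hs : PySem.List.sorted ((human_codon_usage.lookup "C").getD []) (fun x => x.2) true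
      = [("TGC", 54), ("TGT", 46)] := rfl
  have ht : (top_two.lookup "C").getD ("", none) = ("TGC", some "TGT") := rfl
  rw [hs, ht]
  generalize PySem.Str.upper cc = cu
  by_cases h0 : cu = "TGC"
  · subst h0; decide
  by_cases h1 : cu = "TGT"
  · subst h1; decide
  simp_all [firstDiffA, eq_comm]

lemma case_L (cc : String) : select_codon "L" cc = select_codon_alt "L" cc := by
  unfold select_codon select_codon_alt
  have hs : PySem.List.sorted ((human_codon_usage.lookup "L").getD []) (fun x => x.2) true
      = [("CTG", 40), ("CTC", 20), ("TTG", 13), ("CTT", 13), ("TTA", 8), ("CTA", 7)] := rfl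
  have ht : (top_two.lookup "L").getD ("", none) = ("CTG", some "CTC") := rfl
  rw [hs, ht]
  generalize PySem.Str.upper cc = cu
  by_cases h0 : cu = "CTG"
  · subst h0; decide
  by_cases h1 : cu = "CTC"
  · subst h1; decide
  by_cases h2 : cu = "TTG"
  · subst h2; decide
  by_cases h3 : cu = "CTT"
  · subst h3; decide
  by_cases h4 : cu = "TTA"
  · subst h4; decide
  by_cases h5 : cu = "CTA"
  · subst h5; decide
  simp_all [firstDiffA, eq_comm]

lemma case_Stop (cc : String) : select_codon "*" cc = select_codon_alt "*" cc := by
  unfold select_codon select_codon_alt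
  have hs : PySem.List.sorted ((human_codon_usage.lookup "*").getD []) (fun x => x.2) true
      = [("TGA", 47), ("TAA", 30), ("TAG", 24)] := rfl
  have ht : (top_two.lookup "*").getD ("", none) = ("TGA", some "TAA") := rfl
  rw [hs, ht]
  generalize PySem.Str.upper cc = cu
  by_cases h0 : cu = "TGA"
  · subst h0; decide
  by_cases h1 : cu = "TAA"
  · subst h1; decide
  by_cases h2 : cu = "TAG"
  · subst h2; decide
  simp_all [firstDiffA, eq_comm]

lemma case_W (cc : String) : select_codon "W" cc = select_codon_alt "W" cc := by
  unfold select_codon select_codon_alt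
  have hs : PySem.List.sorted ((human_codon_usage.lookup "W").getD []) (fun x => x.2) true
      = [("TGG", 100)] := rfl
  have ht : (top_two.lookup "W").getD ("", none) = ("TGG", none) := rfl
  rw [hs, ht]
  generalize PySem.Str.upper cc = cu
  by_cases h0 : cu = "TGG"
  · subst h0; decide
  simp_all [firstDiffA, eq_comm]

lemma case_P (cc : String) : select_codon "P" cc = select_codon_alt "P" cc := by
  unfold select_codon select_codon_alt
  have hs : PySem.List.sorted ((human_codon_usage.lookup "P").getD []) (fun x => x.2) true
      = [("CCC", 32), ("CCT", 29), ("CCA", 28), ("CCG", 11)] := rfl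
  have ht : (top_two.lookup "P").getD ("", none) = ("CCC", some "CCT") := rfl
  rw [hs, ht]
  generalize PySem.Str.upper cc = cu
  by_cases h0 : cu = "CCC"
  · subst h0; decide
  by_cases h1 : cu = "CCT"
  · subst h1; decide
  by_cases h2 : cu = "CCA"
  · subst h2; decide
  by_cases h3 : cu = "CCG"
  · subst h3; decide
  simp_all [firstDiffA, eq_comm]

lemma case_H (cc : String) : select_codon "H" cc = select_codon_alt "H" cc := by
  unfold select_codon select_codon_alt
  have hs : PySem.List.sorted ((human_codon_usage.lookup "H").getD []) (fun x => x.2) true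
      = [("CAC", 58), ("CAT", 42)] := rfl
  have ht : (top_two.lookup "H").getD ("", none) = ("CAC", some "CAT") := rfl
  rw [hs, ht]
  generalize PySem.Str.upper cc = cu
  by_cases h0 : cu = "CAC"
  · subst h0; decide
  by_cases h1 : cu = "CAT"
  · subst h1; decide
  simp_all [firstDiffA, eq_comm]

lemma case_Q (cc : String) : select_codon "Q" cc = select_codon_alt "Q" cc := by
  unfold select_codon select_codon_alt
  have hs : PySem.List.sorted ((human_codon_usage.lookup "Q").getD []) (fun x => x.2) true
      = [("CAG", 73), ("CAA", 27)] := rfl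
  have ht : (top_two.lookup "Q").getD ("", none) = ("CAG", some "CAA") := rfl
  rw [hs, ht]
  generalize PySem.Str.upper cc = cu
  by_cases h0 : cu = "CAG"
  · subst h0; decide
  by_cases h1 : cu = "CAA"
  · subst h1; decide
  simp_all [firstDiffA, eq_comm]

lemma case_R (cc : String) : select_codon "R" cc = select_codon_alt "R" cc := by
  unfold select_codon select_codon_alt
  have hs : PySem.List.sorted ((human_codon_usage.lookup "R").getD []) (fun x => x.2) true
      = [("AGA", 21), ("AGG", 21), ("CGG", 20), ("CGC", 18), ("CGA", 11), ("CGT", 8)] := rfl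
  have ht : (top_two.lookup "R").getD ("", none) = ("AGA", some "AGG") := rfl
  rw [hs, ht]
  generalize PySem.Str.upper cc = cu
  by_cases h0 : cu = "AGA"
  · subst h0; decide
  by_cases h1 : cu = "AGG"
  · subst h1; decide
  by_cases h2 : cu = "CGG"
  · subst h2; decide
  by_cases h3 : cu = "CGC"
  · subst h3; decide
  by_cases h4 : cu = "CGA"
  · subst h4; decide
  by_cases h5 : cu = "CGT"
  · subst h5; decide
  simp_all [firstDiffA, eq_comm]

lemma case_I (cc : String) : select_codon "I" cc = select_codon_alt "I" cc := by
  unfold select_codon select_codon_alt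
  have hs : PySem.List.sorted ((human_codon_usage.lookup "I").getD []) (fun x => x.2) true
      = [("ATC", 47), ("ATT", 36), ("ATA", 17)] := rfl
  have ht : (top_two.lookup "I").getD ("", none) = ("ATC", some "ATT") := rfl
  rw [hs, ht]
  generalize PySem.Str.upper cc = cu
  by_cases h0 : cu = "ATC"
  · subst h0; decide
  by_cases h1 : cu = "ATT"
  · subst h1; decide
  by_cases h2 : cu = "ATA"
  · subst h2; decide
  simp_all [firstDiffA, eq_comm]

lemma case_T (cc : String) : select_codon "T" cc = select_codon_alt "T" cc := by
  unfold select_codon select_codon_alt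
  have hs : PySem.List.sorted ((human_codon_usage.lookup "T").getD []) (fun x => x.2) true
      = [("ACC", 36), ("ACA", 28), ("ACT", 25), ("ACG", 11)] := rfl
  have ht : (top_two.lookup "T").getD ("", none) = ("ACC", some "ACA") := rfl
  rw [hs, ht]
  generalize PySem.Str.upper cc = cu
  by_cases h0 : cu = "ACC"
  · subst h0; decide
  by_cases h1 : cu = "ACA"
  · subst h1; decide
  by_cases h2 : cu = "ACT"
  · subst h2; decide
  by_cases h3 : cu = "ACG"
  · subst h3; decide
  simp_all [firstDiffA, eq_comm]

lemma case_N (cc : String) : select_codon "N" cc = select_codon_alt "N" cc := by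
  unfold select_codon select_codon_alt
  have hs : PySem.List.sorted ((human_codon_usage.lookup "N").getD []) (fun x => x.2) true
      = [("AAC", 53), ("AAT", 47)] := rfl
  have ht : (top_two.lookup "N").getD ("", none) = ("AAC", some "AAT") := rfl
  rw [hs, ht]
  generalize PySem.Str.upper cc = cu
  by_cases h0 : cu = "AAC"
  · subst h0; decide
  by_cases h1 : cu = "AAT"
  · subst h1; decide
  simp_all [firstDiffA, eq_comm]

lemma case_K (cc : String) : select_codon "K" cc = select_codon_alt "K" cc := by
  unfold select_codon select_codon_alt
  have hs : PySem.List.sorted ((human_codon_usage.lookup "K").getD []) (fun x => x.2) true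
      = [("AAG", 57), ("AAA", 43)] := rfl
  have ht : (top_two.lookup "K").getD ("", none) = ("AAG", some "AAA") := rfl
  rw [hs, ht]
  generalize PySem.Str.upper cc = cu
  by_cases h0 : cu = "AAG"
  · subst h0; decide
  by_cases h1 : cu = "AAA"
  · subst h1; decide
  simp_all [firstDiffA, eq_comm]

lemma case_M (cc : String) : select_codon "M" cc = select_codon_alt "M" cc := by
  unfold select_codon select_codon_alt
  have hs : PySem.List.sorted ((human_codon_usage.lookup "M").getD []) (fun x => x.2) true
      = [("ATG", 100)] := rfl
  have ht : (top_two.lookup "M").getD ("", none) = ("ATG", none) := rfl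
  rw [hs, ht]
  generalize PySem.Str.upper cc = cu
  by_cases h0 : cu = "ATG"
  · subst h0; decide
  simp_all [firstDiffA, eq_comm]

lemma case_V (cc : String) : select_codon "V" cc = select_codon_alt "V" cc := by
  unfold select_codon select_codon_alt
  have hs : PySem.List.sorted ((human_codon_usage.lookup "V").getD []) (fun x => x.2) true
      = [("GTG", 46), ("GTC", 24), ("GTT", 18), ("GTA", 12)] := rfl
  have ht : (top_two.lookup "V").getD ("", none) = ("GTG", some "GTC") := rfl
  rw [hs, ht]
  generalize PySem.Str.upper cc = cu
  by_cases h0 : cu = "GTG"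
  · subst h0; decide
  by_cases h1 : cu = "GTC"
  · subst h1; decide
  by_cases h2 : cu = "GTT"
  · subst h2; decide
  by_cases h3 : cu = "GTA"
  · subst h3; decide
  simp_all [firstDiffA, eq_comm]

lemma case_A (cc : String) : select_codon "A" cc = select_codon_alt "A" cc := by
  unfold select_codon select_codon_alt
  have hs : PySem.List.sorted ((human_codon_usage.lookup "A").getD []) (fun x => x.2) true
      = [("GCC", 40), ("GCT", 27), ("GCA", 23), ("GCG", 11)] := rfl
  have ht : (top_two.lookup "A").getD ("", none) = ("GCC", some "GCT") := rfl
  rw [hs, ht]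
  generalize PySem.Str.upper cc = cu
  by_cases h0 : cu = "GCC"
  · subst h0; decide
  by_cases h1 : cu = "GCT"
  · subst h1; decide
  by_cases h2 : cu = "GCA"
  · subst h2; decide
  by_cases h3 : cu = "GCG"
  · subst h3; decide
  simp_all [firstDiffA, eq_comm]

lemma case_D (cc : String) : select_codon "D" cc = select_codon_alt "D" cc := by
  unfold select_codon select_codon_alt
  have hs : PySem.List.sorted ((human_codon_usage.lookup "D").getD []) (fun x => x.2) true
      = [("GAC", 54), ("GAT", 46)] := rfl
  have ht : (top_two.lookup "D").getD ("", none) = ("GAC", some "GAT") := rfl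
  rw [hs, ht]
  generalize PySem.Str.upper cc = cu
  by_cases h0 : cu = "GAC"
  · subst h0; decide
  by_cases h1 : cu = "GAT"
  · subst h1; decide
  simp_all [firstDiffA, eq_comm]

lemma case_E (cc : String) : select_codon "E" cc = select_codon_alt "E" cc := by
  unfold select_codon select_codon_alt
  have hs : PySem.List.sorted ((human_codon_usage.lookup "E").getD []) (fun x => x.2) true
      = [("GAG", 58), ("GAA", 42)] := rfl
  have ht : (top_two.lookup "E").getD ("", none) = ("GAG", some "GAA") := rfl
  rw [hs, ht]
  generalize PySem.Str.upper cc = cu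
  by_cases h0 : cu = "GAG"
  · subst h0; decide
  by_cases h1 : cu = "GAA"
  · subst h1; decide
  simp_all [firstDiffA, eq_comm]

lemma case_G (cc : String) : select_codon "G" cc = select_codon_alt "G" cc := by
  unfold select_codon select_codon_alt
  have hs : PySem.List.sorted ((human_codon_usage.lookup "G").getD []) (fun x => x.2) true
      = [("GGC", 34), ("GGA", 25), ("GGG", 25), ("GGT", 16)] := rfl
  have ht : (top_two.lookup "G").getD ("", none) = ("GGC", some "GGA") := rfl
  rw [hs, ht]
  generalize PySem.Str.upper cc = cu
  by_cases h0 : cu = "GGC"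
  · subst h0; decide
  by_cases h1 : cu = "GGA"
  · subst h1; decide
  by_cases h2 : cu = "GGG"
  · subst h2; decide
  by_cases h3 : cu = "GGT"
  · subst h3; decide
  simp_all [firstDiffA, eq_comm]

-- ===== VERDICT (by name: the statement is the Claim_ definition above) =====
theorem select_codon_spec : Claim_equal_select_codon := by
  intro aa cc _hdom hpre
  unfold Spec_select_codon
  simp only [Pre_select_codon, List.mem_cons, List.not_mem_nil, or_false] at hpre
  rcases hpre with h|h|h|h|h|h|h|h|h|h|h|h|h|h|h|h|h|h|h|h|h <;> subst h
  · exact case_F cc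
  · exact case_S cc
  · exact case_Y cc
  · exact case_C cc
  · exact case_L cc
  · exact case_Stop cc
  · exact case_W cc
  · exact case_P cc
  · exact case_H cc
  · exact case_Q cc
  · exact case_R cc
  · exact case_I cc
  · exact case_T cc
  · exact case_N cc
  · exact case_K cc
  · exact case_M cc
  · exact case_V cc
  · exact case_A cc
  · exact case_D cc
  · exact case_E cc
  · exact case_G cc
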